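-- pv_equiv track=rewrite | github.com/jaeyo03/CodingTest | Exhaustive Search/HW3.py | solution
-- ===== SOURCE A (Python) =====
-- from collections import deque
-- from itertools import product
--
-- def solution(a,b,x):
--     answer = [0]
--     remains = [deque([x]),deque([]),deque([]),deque([]),deque([])]
--
--     for i in range(1,5):
--         remain = remains[i-1]
--         next_remain = remains[i]
--         count = 0
--         while remain:
--             health = remain.popleft()
--             first_attack_okay = []
--
--             for first_attack in range(a,b+1):
--                 if first_attack*2 >= health:
--                     first_attack_okay.append(first_attack)
--                     count += 1
--
--             possible = product(range(a,b+1),repeat=2)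
--             for p in possible:
--                 first = p[0]
--                 second = p[1]
--                 # 이미 첫번째로 만족했다면 넘겨
--                 if first in first_attack_okay:
--                     continue
--                 else:
--                     whole_attack = first*2 + second
--                     if whole_attack >= health:
--                         count += 1
--                     else:
--                         next_remain.append(health-whole_attack)
--
--         answer.append(count)
--     return answer
-- ===== SOURCE B (Python) =====
-- def solution(a, b, x):
--     # per-level multiset of remaining healths as {health: multiplicity};
--     # per health, attack counts come from range arithmetic instead of scanning pairs
--     answer = [0]
--     cur = {x: 1}
--     for _ in range(4):
--         count = 0
--         nxt = {}
--         for h, c in cur.items():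
--             half = -(-h // 2)  # smallest f with 2*f >= h
--             count += c * max(0, (b + 1) - max(a, half))
--             for f in range(a, min(b + 1, half)):
--                 need = h - 2 * f
--                 count += c * max(0, (b + 1) - max(a, need))
--                 for s in range(a, min(b + 1, need)):
--                     v = need - s
--                     nxt[v] = nxt.get(v, 0) + c
--         answer.append(count)
--         cur = nxt
--     return answer
-- ===== Notes on version B (the rewrite author's own statement) =====
-- stated objective: faster
-- what changed: B replaces A's breadth-first deque of individual remaining healths and its full scan of all (first, second) attack pairs per health by a {health: multiplicity} dictionary per level with closed-form range counting (number of killing first attacks and of killing seconds per surviving first computed arithmetically), so duplicate healths are processed once and the quadratic pair scan disappears.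
import Mathlib
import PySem

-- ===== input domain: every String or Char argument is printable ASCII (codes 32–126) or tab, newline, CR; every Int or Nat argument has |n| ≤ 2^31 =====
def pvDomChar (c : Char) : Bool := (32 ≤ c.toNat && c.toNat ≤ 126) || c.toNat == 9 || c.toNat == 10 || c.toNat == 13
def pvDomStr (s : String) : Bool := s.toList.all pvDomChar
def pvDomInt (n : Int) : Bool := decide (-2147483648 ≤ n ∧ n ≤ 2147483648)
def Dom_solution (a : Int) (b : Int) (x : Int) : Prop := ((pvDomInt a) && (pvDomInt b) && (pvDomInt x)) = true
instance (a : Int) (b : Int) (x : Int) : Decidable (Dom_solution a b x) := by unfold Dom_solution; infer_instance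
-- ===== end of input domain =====

-- B replaces A's breadth-first queue of individual healths and its quadratic scan over all
-- (first, second) attack pairs by a multiplicity dictionary over distinct healths with
-- closed-form range counting per health (objective: faster).

-- ===== PORT A =====
-- one popped health: update (count, next_remain)
def solutionAStep (a : Int) (b : Int) (st : Int × List Int) (health : Int) : Int × List Int :=
  let r1 := (PySem.List.pyRange a (b + 1) 1).foldl
      (fun (q : List Int × Int) first_attack =>
        if health ≤ first_attack * 2 then (q.1 ++ [first_attack], q.2 + 1) else q)
      ([], st.1)
  let possible := (PySem.List.pyRange a (b + 1) 1).flatMap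
      (fun first => (PySem.List.pyRange a (b + 1) 1).map (fun second => (first, second)))
  possible.foldl
    (fun (q : Int × List Int) p =>
      if r1.1.contains p.1 then q
      else if health ≤ p.1 * 2 + p.2 then (q.1 + 1, q.2)
      else (q.1, q.2 ++ [health - (p.1 * 2 + p.2)]))
    (r1.2, st.2)

-- 'while remain:' — pop from the front, push survivors to next_remain
def solutionLevel (a : Int) (b : Int) (remain : List Int) : Int × List Int :=
  remain.foldl (solutionAStep a b) (0, [])

def solution (a : Int) (b : Int) (x : Int) : List Int :=
  ((PySem.List.pyRange 1 5 1).foldl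
    (fun (st : List Int × List Int) _i =>
      let lr := solutionLevel a b st.2
      (st.1 ++ [lr.1], lr.2))
    ([0], [x])).1

-- ===== PORT B =====
-- half = -(-h // 2) : the smallest f with 2*f >= h
def solutionAltHalf (h : Int) : Int := -(PySem.Int.floordiv (-h) 2)

-- one (health, multiplicity) item of the level dictionary
def solutionAltStep (a : Int) (b : Int) (st : Int × PySem.Dict Int Int) (p : Int × Int) :
    Int × PySem.Dict Int Int :=
  let h := p.1
  let c := p.2
  let half := solutionAltHalf h
  let cnt0 := st.1 + c * max 0 ((b + 1) - max a half)
  (PySem.List.pyRange a (min (b + 1) half) 1).foldl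
    (fun (q : Int × PySem.Dict Int Int) f =>
      let need := h - 2 * f
      (q.1 + c * max 0 ((b + 1) - max a need),
       (PySem.List.pyRange a (min (b + 1) need) 1).foldl
         (fun (d : PySem.Dict Int Int) s => d.modify (need - s) 0 (· + c)) q.2))
    (cnt0, st.2)

def solutionAltLevel (a : Int) (b : Int) (cur : PySem.Dict Int Int) : Int × PySem.Dict Int Int :=
  cur.items.foldl (solutionAltStep a b) (0, PySem.Dict.empty)

def solution_alt (a : Int) (b : Int) (x : Int) : List Int :=
  ((PySem.List.pyRange 0 4 1).foldl
    (fun (st : List Int × PySem.Dict Int Int) _i =>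
      let lr := solutionAltLevel a b st.2
      (st.1 ++ [lr.1], lr.2))
    ([0], PySem.Dict.empty.insert x 1)).1

-- ===== PRECONDITION & SPEC =====
def Spec_solution (a : Int) (b : Int) (x : Int) (out : List Int) : Prop := out = solution_alt a b x
instance (a : Int) (b : Int) (x : Int) (out : List Int) : Decidable (Spec_solution a b x out) := by unfold Spec_solution; infer_instance

-- ===== CLAIM (what is proved, stated in full; the proofs are below) =====
def Claim_equal_solution : Prop := ∀ (a : Int) (b : Int) (x : Int), Dom_solution a b x → Spec_solution a b x (solution a b x)

-- ===== LEMMAS AND PROOFS =====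

-- count contributed by one health, in B's closed form
def perB (a b h : Int) : Int :=
  max 0 ((b + 1) - max a (solutionAltHalf h)) +
  ((PySem.List.pyRange a (min (b + 1) (solutionAltHalf h)) 1).map
     (fun f => max 0 ((b + 1) - max a (h - 2 * f)))).sum

-- healths spawned by one health, in A's order
def spawnB (a b h : Int) : List Int :=
  (PySem.List.pyRange a (min (b + 1) (solutionAltHalf h)) 1).flatMap
    (fun f => (PySem.List.pyRange a (min (b + 1) (h - 2 * f)) 1).map (fun s => (h - 2 * f) - s))

theorem half_le_iff (h f : Int) : (h ≤ f * 2) ↔ (solutionAltHalf h ≤ f) := by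
  unfold solutionAltHalf
  rw [neg_le, PySem.Int.le_floordiv_iff_mul_le (by omega : (0:Int) < 2)]
  omega

theorem fold_flatMap {α β γ : Type} (l : List α) (g : α → List β) (f : γ → β → γ) (i : γ) :
    (l.flatMap g).foldl f i = l.foldl (fun acc x => (g x).foldl f acc) i := by
  induction l generalizing i with
  | nil => rfl
  | cons h t ih => simp [List.flatMap_cons, List.foldl_append, ih]

theorem sum_map_ite_zero (l : List Int) (p : Int → Prop) [DecidablePred p] (g : Int → Int) :
    (l.map (fun x => if p x then 0 else g x)).sum
      = ((l.filter (fun x => decide (¬ p x))).map g).sum := by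
  induction l with
  | nil => rfl
  | cons h t ih =>
    by_cases hp : p h <;> simp [hp, ih]

theorem flatMap_ite_nil {β : Type} (l : List Int) (p : Int → Prop) [DecidablePred p]
    (g : Int → List β) :
    (l.flatMap (fun x => if p x then [] else g x))
      = (l.filter (fun x => decide (¬ p x))).flatMap g := by
  induction l with
  | nil => rfl
  | cons h t ih =>
    by_cases hp : p h <;> simp [hp, ih]

theorem countP_pyRange_ge (a b t : Int) :
    (((PySem.List.pyRange a b 1).countP (fun f => decide (t ≤ f))) : Int) = max 0 (b - max a t) := by
  suffices H : ∀ (n : Nat) (a : Int), (b - a).toNat = n →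
      (((PySem.List.pyRange a b 1).countP (fun f => decide (t ≤ f))) : Int) = max 0 (b - max a t) from
    H _ a rfl
  intro n
  induction n with
  | zero =>
    intro a ha
    rw [PySem.List.pyRange_one_eq_nil (by omega)]
    simp; omega
  | succ n ih =>
    intro a ha
    rw [PySem.List.pyRange_one_cons (by omega), List.countP_cons]
    have h2 := ih (a + 1) (by omega)
    by_cases ht : t ≤ a
    · rw [if_pos (by simpa using ht)]
      push_cast
      omega
    · rw [if_neg (by simpa using ht)]
      push_cast
      omega

theorem filter_pyRange_lt (a b t : Int) :
    (PySem.List.pyRange a b 1).filter (fun f => decide (f < t)) = PySem.List.pyRange a (min b t) 1 := by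
  suffices H : ∀ (n : Nat) (a : Int), (b - a).toNat = n →
      (PySem.List.pyRange a b 1).filter (fun f => decide (f < t)) = PySem.List.pyRange a (min b t) 1 from
    H _ a rfl
  intro n
  induction n with
  | zero =>
    intro a ha
    rw [PySem.List.pyRange_one_eq_nil (by omega), PySem.List.pyRange_one_eq_nil (by omega)]
    rfl
  | succ n ih =>
    intro a ha
    rw [PySem.List.pyRange_one_cons (by omega), List.filter_cons]
    rw [ih (a + 1) (by omega)]
    by_cases ht : a < t
    · rw [PySem.List.pyRange_one_cons (a := a) (b := min b t) (by omega)]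
      simp [ht]
    · have e1 : PySem.List.pyRange a (min b t) 1 = [] := PySem.List.pyRange_one_eq_nil (by omega)
      have e2 : PySem.List.pyRange (a + 1) (min b t) 1 = [] := PySem.List.pyRange_one_eq_nil (by omega)
      simp [ht, e1, e2]

theorem K1 (a b : Int) (st : Int × List Int) (h : Int) :
    solutionAStep a b st h = (st.1 + perB a b h, st.2 ++ spawnB a b h) := by
  have hstep1 : (PySem.List.pyRange a (b + 1) 1).foldl
      (fun (q : List Int × Int) fa => if h ≤ fa * 2 then (q.1 ++ [fa], q.2 + 1) else q) ([], st.1)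
      = ((PySem.List.pyRange a (b + 1) 1).filter (fun f => decide (h ≤ f * 2)),
         st.1 + max 0 ((b + 1) - max a (solutionAltHalf h))) := by
    have e1 : (PySem.List.pyRange a (b + 1) 1).foldl
        (fun (q : List Int × Int) fa => if h ≤ fa * 2 then (q.1 ++ [fa], q.2 + 1) else q) ([], st.1)
        = ((PySem.List.pyRange a (b + 1) 1).foldl
            (fun (l : List Int) fa => if h ≤ fa * 2 then l ++ [fa] else l) [],
           (PySem.List.pyRange a (b + 1) 1).foldl
            (fun (n : Int) fa => if h ≤ fa * 2 then n + 1 else n) st.1) := by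
      rw [PySem.List.foldl_congr_mem _ _
        (fun (q : List Int × Int) fa =>
          ((if h ≤ fa * 2 then q.1 ++ [fa] else q.1), (if h ≤ fa * 2 then q.2 + 1 else q.2))) _
        (by intro q fa _; by_cases hc : h ≤ fa * 2 <;> simp [hc])]
      exact PySem.List.foldl_prod_mk
        (f := fun (l : List Int) fa => if h ≤ fa * 2 then l ++ [fa] else l)
        (g := fun (n : Int) fa => if h ≤ fa * 2 then n + 1 else n) _ [] st.1
    rw [e1]
    rw [PySem.List.foldl_append_ite_eq_filter (fun f => h ≤ f * 2)]
    rw [PySem.List.foldl_ite_add_one (fun f => h ≤ f * 2)]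
    have e2 : (fun f => decide (h ≤ f * 2)) = (fun f => decide (solutionAltHalf h ≤ f)) := by
      funext f; simp [half_le_iff]
    rw [List.nil_append]
    refine Prod.ext rfl ?_
    simp only [e2]
    rw [countP_pyRange_ge a (b + 1) (solutionAltHalf h)]
  have hcont : ∀ y ∈ PySem.List.pyRange a (b + 1) 1,
      (((PySem.List.pyRange a (b + 1) 1).filter (fun f => decide (h ≤ f * 2))).contains y)
        = decide (h ≤ y * 2) := by
    intro y hy
    by_cases hp : h ≤ y * 2
    · have hmem : y ∈ (PySem.List.pyRange a (b + 1) 1).filter (fun f => decide (h ≤ f * 2)) :=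
        List.mem_filter.2 ⟨hy, by simpa⟩
      rw [List.contains_iff_mem.2 hmem, decide_eq_true hp]
    · have hmem : y ∉ (PySem.List.pyRange a (b + 1) 1).filter (fun f => decide (h ≤ f * 2)) :=
        fun hm => hp (by simpa using (List.mem_filter.1 hm).2)
      have hfalse : (((PySem.List.pyRange a (b + 1) 1).filter
          (fun f => decide (h ≤ f * 2))).contains y) = false := by
        rw [← Bool.not_eq_true]
        exact fun hc => hmem (List.contains_iff_mem.1 hc)
      rw [hfalse, decide_eq_false hp]
  have hmem1 : ∀ pr ∈ (PySem.List.pyRange a (b + 1) 1).flatMap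
      (fun first => (PySem.List.pyRange a (b + 1) 1).map (fun second => (first, second))),
      pr.1 ∈ PySem.List.pyRange a (b + 1) 1 := by
    intro pr hpr
    rcases List.mem_flatMap.1 hpr with ⟨f, hf, hmap⟩
    rcases List.mem_map.1 hmap with ⟨s, _, rfl⟩
    simpa using hf
  have hinner_fst : ∀ (acc : Int), ∀ f ∈ PySem.List.pyRange a (b + 1) 1,
      ((PySem.List.pyRange a (b + 1) 1).map (fun second => (f, second))).foldl
        (fun (n : Int) pr => if ¬ (h ≤ pr.1 * 2) ∧ (h ≤ pr.1 * 2 + pr.2) then n + 1 else n) acc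
      = acc + (if h ≤ f * 2 then 0 else max 0 ((b + 1) - max a (h - 2 * f))) := by
    intro acc f _
    rw [List.foldl_map]
    by_cases hok : h ≤ f * 2
    · rw [PySem.List.foldl_congr_mem _ _ (fun (n : Int) (_ : Int) => n) _
        (by intro n s _
            show (if ¬ (h ≤ f * 2) ∧ (h ≤ f * 2 + s) then n + 1 else n) = n
            simp [hok])]
      rw [PySem.List.foldl_ignore]
      simp [hok]
    · rw [PySem.List.foldl_congr_mem _ _
        (fun (n : Int) (s : Int) => if (h - f * 2) ≤ s then n + 1 else n) _
        (by
          intro n s _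
          show (if ¬ (h ≤ f * 2) ∧ (h ≤ f * 2 + s) then n + 1 else n)
            = (if (h - f * 2) ≤ s then n + 1 else n)
          by_cases h2 : h - f * 2 ≤ s
          · rw [if_pos ⟨hok, by omega⟩, if_pos h2]
          · rw [if_neg (fun hc => h2 (by omega)), if_neg h2])]
      rw [PySem.List.foldl_ite_add_one (fun s => (h - f * 2) ≤ s)]
      rw [countP_pyRange_ge a (b + 1) (h - f * 2)]
      have e3 : h - f * 2 = h - 2 * f := by ring
      rw [e3]
      simp [hok]
  have hinner_snd : ∀ (acc : List Int), ∀ f ∈ PySem.List.pyRange a (b + 1) 1,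
      ((PySem.List.pyRange a (b + 1) 1).map (fun second => (f, second))).foldl
        (fun (l : List Int) pr =>
          if ¬ (h ≤ pr.1 * 2) ∧ ¬ (h ≤ pr.1 * 2 + pr.2) then l ++ [h - (pr.1 * 2 + pr.2)] else l) acc
      = acc ++ (if h ≤ f * 2 then []
          else (PySem.List.pyRange a (min (b + 1) (h - 2 * f)) 1).map (fun s => (h - 2 * f) - s)) := by
    intro acc f _
    rw [List.foldl_map]
    by_cases hok : h ≤ f * 2
    · rw [PySem.List.foldl_congr_mem _ _ (fun (l : List Int) (_ : Int) => l) _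
        (by intro l s _
            show (if ¬ (h ≤ f * 2) ∧ ¬ (h ≤ f * 2 + s) then l ++ [h - (f * 2 + s)] else l) = l
            simp [hok])]
      rw [PySem.List.foldl_ignore]
      simp [hok]
    · rw [PySem.List.foldl_congr_mem _ _
        (fun (l : List Int) (s : Int) => if (s < h - f * 2) then l ++ [h - (f * 2 + s)] else l) _
        (by
          intro l s _
          show (if ¬ (h ≤ f * 2) ∧ ¬ (h ≤ f * 2 + s) then l ++ [h - (f * 2 + s)] else l)
            = (if (s < h - f * 2) then l ++ [h - (f * 2 + s)] else l)
          by_cases h2 : s < h - f * 2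
          · rw [if_pos ⟨hok, by omega⟩, if_pos h2]
          · rw [if_neg (fun hc => h2 (by omega)), if_neg h2])]
      rw [PySem.List.foldl_append_ite (fun s => s < h - f * 2) (fun s => h - (f * 2 + s))]
      rw [filter_pyRange_lt a (b + 1) (h - f * 2)]
      have e3 : h - f * 2 = h - 2 * f := by ring
      rw [e3]
      rw [List.map_congr_left (l := PySem.List.pyRange a (min (b + 1) (h - 2 * f)) 1)
        (f := fun s => h - (f * 2 + s)) (g := fun s => (h - 2 * f) - s)
        (fun s _ => by ring)]
      simp [hok]
  simp only [solutionAStep]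
  rw [hstep1]
  simp only []
  rw [PySem.List.foldl_congr_mem _ _
    (fun (q : Int × List Int) p =>
      ((if ¬ (h ≤ p.1 * 2) ∧ (h ≤ p.1 * 2 + p.2) then q.1 + 1 else q.1),
       (if ¬ (h ≤ p.1 * 2) ∧ ¬ (h ≤ p.1 * 2 + p.2) then q.2 ++ [h - (p.1 * 2 + p.2)] else q.2))) _
    (by
      intro q p hp
      rw [hcont p.1 (hmem1 p hp)]
      by_cases h1 : h ≤ p.1 * 2 <;> by_cases h2 : h ≤ p.1 * 2 + p.2 <;> simp [h1, h2])]
  rw [show List.foldl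
      (fun (q : Int × List Int) p =>
        ((if ¬ (h ≤ p.1 * 2) ∧ (h ≤ p.1 * 2 + p.2) then q.1 + 1 else q.1),
         (if ¬ (h ≤ p.1 * 2) ∧ ¬ (h ≤ p.1 * 2 + p.2) then q.2 ++ [h - (p.1 * 2 + p.2)] else q.2)))
      (st.1 + max 0 ((b + 1) - max a (solutionAltHalf h)), st.2)
      ((PySem.List.pyRange a (b + 1) 1).flatMap
        (fun first => (PySem.List.pyRange a (b + 1) 1).map (fun second => (first, second))))
      = (List.foldl
          (fun (n : Int) p => if ¬ (h ≤ p.1 * 2) ∧ (h ≤ p.1 * 2 + p.2) then n + 1 else n)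
          (st.1 + max 0 ((b + 1) - max a (solutionAltHalf h)))
          ((PySem.List.pyRange a (b + 1) 1).flatMap
            (fun first => (PySem.List.pyRange a (b + 1) 1).map (fun second => (first, second)))),
         List.foldl
          (fun (l : List Int) p =>
            if ¬ (h ≤ p.1 * 2) ∧ ¬ (h ≤ p.1 * 2 + p.2) then l ++ [h - (p.1 * 2 + p.2)] else l)
          st.2
          ((PySem.List.pyRange a (b + 1) 1).flatMap
            (fun first => (PySem.List.pyRange a (b + 1) 1).map (fun second => (first, second)))))
      from PySem.List.foldl_prod_mk
        (f := fun (n : Int) (p : Int × Int) =>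
          if ¬ (h ≤ p.1 * 2) ∧ (h ≤ p.1 * 2 + p.2) then n + 1 else n)
        (g := fun (l : List Int) (p : Int × Int) =>
          if ¬ (h ≤ p.1 * 2) ∧ ¬ (h ≤ p.1 * 2 + p.2) then l ++ [h - (p.1 * 2 + p.2)] else l)
        _ _ _]
  have hfiltc : (PySem.List.pyRange a (b + 1) 1).filter (fun f => decide (¬ h ≤ f * 2))
      = PySem.List.pyRange a (min (b + 1) (solutionAltHalf h)) 1 := by
    rw [List.filter_congr (q := fun f => decide (f < solutionAltHalf h))
      (by intro f _; simp only [decide_eq_decide]; have := half_le_iff h f; omega)]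
    exact filter_pyRange_lt a (b + 1) (solutionAltHalf h)
  refine Prod.ext ?_ ?_
  · show List.foldl _ _ _ = st.1 + perB a b h
    rw [fold_flatMap]
    rw [PySem.List.foldl_congr_mem _ _
      (fun (n : Int) f => n + (if h ≤ f * 2 then 0 else max 0 ((b + 1) - max a (h - 2 * f)))) _
      hinner_fst]
    rw [PySem.List.foldl_add
      (g := fun f => if h ≤ f * 2 then 0 else max 0 ((b + 1) - max a (h - 2 * f)))]
    rw [sum_map_ite_zero _ (fun f => h ≤ f * 2)
      (fun f => max 0 ((b + 1) - max a (h - 2 * f)))]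
    rw [hfiltc]
    unfold perB
    ring
  · show List.foldl _ _ _ = st.2 ++ spawnB a b h
    rw [fold_flatMap]
    rw [PySem.List.foldl_congr_mem _ _
      (fun (l : List Int) f => l ++ (if h ≤ f * 2 then []
        else (PySem.List.pyRange a (min (b + 1) (h - 2 * f)) 1).map (fun s => (h - 2 * f) - s))) _
      hinner_snd]
    rw [PySem.List.foldl_append_eq_flatMap
      (g := fun f => if h ≤ f * 2 then []
        else (PySem.List.pyRange a (min (b + 1) (h - 2 * f)) 1).map (fun s => (h - 2 * f) - s))]
    rw [flatMap_ite_nil _ (fun f => h ≤ f * 2) _]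
    rw [hfiltc]
    rfl

theorem LA (a b : Int) (L : List Int) (c0 : Int) (n0 : List Int) :
    L.foldl (solutionAStep a b) (c0, n0) =
      (c0 + (L.map (perB a b)).sum, n0 ++ L.flatMap (spawnB a b)) := by
  induction L generalizing c0 n0 with
  | nil => simp
  | cons h t ih => simp [K1, ih, add_assoc]

theorem MOD (l : List Int) (key : Int → Int) (c : Int) (d : PySem.Dict Int Int) (v : Int) :
    ((l.foldl (fun d s => d.modify (key s) 0 (· + c)) d).getD v 0)
      = d.getD v 0 + c * ((l.map key).count v : Int) := by
  induction l generalizing d with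
  | nil => simp
  | cons s t ih =>
    simp only [List.foldl_cons, ih, List.map_cons, List.count_cons]
    rw [PySem.Dict.getD_modify]
    by_cases hv : v = key s
    · subst hv
      simp only [beq_self_eq_true, if_true]
      push_cast; ring
    · have hv' : (key s == v) = false := by
        simp only [beq_eq_false_iff_ne, ne_eq]
        exact fun e => hv e.symm
      simp [if_neg hv, hv']

theorem count_flatMap_int (v : Int) (l : List Int) (g : Int → List Int) :
    ((l.flatMap g).count v : Int) = (l.map (fun x => ((g x).count v : Int))).sum := by
  induction l with
  | nil => simp
  | cons h t ih =>
    simp only [List.flatMap_cons, List.count_append, List.map_cons, List.sum_cons, ← ih]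
    push_cast; ring

theorem altStep_snd_aux (a b h c v : Int) (F : List Int) (d : PySem.Dict Int Int) :
    ((F.foldl (fun (d : PySem.Dict Int Int) f =>
        (PySem.List.pyRange a (min (b + 1) (h - 2 * f)) 1).foldl
          (fun d s => d.modify ((h - 2 * f) - s) 0 (· + c)) d) d).getD v 0)
      = d.getD v 0 + c * ((F.flatMap
          (fun f => (PySem.List.pyRange a (min (b + 1) (h - 2 * f)) 1).map
            (fun s => (h - 2 * f) - s))).count v : Int) := by
  induction F generalizing d with
  | nil => simp
  | cons f t ih =>
    simp only [List.foldl_cons, List.flatMap_cons, List.count_append]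
    rw [ih, MOD]
    push_cast; ring

theorem altStep_snd_nodup (a b h c : Int) (F : List Int) (d : PySem.Dict Int Int)
    (hnd : d.keys.Nodup) :
    ((F.foldl (fun (d : PySem.Dict Int Int) f =>
        (PySem.List.pyRange a (min (b + 1) (h - 2 * f)) 1).foldl
          (fun d s => d.modify ((h - 2 * f) - s) 0 (· + c)) d) d).keys.Nodup) := by
  induction F generalizing d with
  | nil => simpa
  | cons f t ih =>
    exact ih _ (PySem.Dict.nodup_keys_foldl_modify_key _ (fun s => (h - 2 * f) - s) 0
      (fun _ _ w => w + c) d hnd)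

theorem altStep_aux (a b h c : Int) (F : List Int) (st : Int × PySem.Dict Int Int) :
    (F.foldl (fun (q : Int × PySem.Dict Int Int) f =>
        (q.1 + c * max 0 ((b + 1) - max a (h - 2 * f)),
         (PySem.List.pyRange a (min (b + 1) (h - 2 * f)) 1).foldl
           (fun d s => d.modify ((h - 2 * f) - s) 0 (· + c)) q.2)) st).1
        = st.1 + c * (F.map (fun f => max 0 ((b + 1) - max a (h - 2 * f)))).sum
    ∧ (F.foldl (fun (q : Int × PySem.Dict Int Int) f =>
        (q.1 + c * max 0 ((b + 1) - max a (h - 2 * f)),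
         (PySem.List.pyRange a (min (b + 1) (h - 2 * f)) 1).foldl
           (fun d s => d.modify ((h - 2 * f) - s) 0 (· + c)) q.2)) st).2
        = F.foldl (fun (d : PySem.Dict Int Int) f =>
            (PySem.List.pyRange a (min (b + 1) (h - 2 * f)) 1).foldl
              (fun d s => d.modify ((h - 2 * f) - s) 0 (· + c)) d) st.2 := by
  induction F generalizing st with
  | nil => simp
  | cons f t ih =>
    simp only [List.foldl_cons, List.map_cons, List.sum_cons]
    obtain ⟨h1, h2⟩ := ih ((st.1 + c * max 0 ((b + 1) - max a (h - 2 * f)),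
      (PySem.List.pyRange a (min (b + 1) (h - 2 * f)) 1).foldl
        (fun d s => d.modify ((h - 2 * f) - s) 0 (· + c)) st.2))
    constructor
    · rw [h1]; ring
    · rw [h2]

theorem K2a (a b : Int) (st : Int × PySem.Dict Int Int) (p : Int × Int) :
    (solutionAltStep a b st p).1 = st.1 + p.2 * perB a b p.1 := by
  simp only [solutionAltStep]
  rw [(altStep_aux a b p.1 p.2 (PySem.List.pyRange a (min (b + 1) (solutionAltHalf p.1)) 1)
      (st.1 + p.2 * max 0 ((b + 1) - max a (solutionAltHalf p.1)), st.2)).1]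
  unfold perB
  ring

theorem K2b (a b : Int) (st : Int × PySem.Dict Int Int) (p : Int × Int) (v : Int) :
    ((solutionAltStep a b st p).2.getD v 0)
      = st.2.getD v 0 + p.2 * (((spawnB a b p.1).count v : Int)) := by
  simp only [solutionAltStep]
  rw [(altStep_aux a b p.1 p.2 (PySem.List.pyRange a (min (b + 1) (solutionAltHalf p.1)) 1)
      (st.1 + p.2 * max 0 ((b + 1) - max a (solutionAltHalf p.1)), st.2)).2]
  rw [altStep_snd_aux a b p.1 p.2 v]
  rfl

theorem K2c (a b : Int) (st : Int × PySem.Dict Int Int) (p : Int × Int)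
    (hnd : st.2.keys.Nodup) : (solutionAltStep a b st p).2.keys.Nodup := by
  simp only [solutionAltStep]
  rw [(altStep_aux a b p.1 p.2 (PySem.List.pyRange a (min (b + 1) (solutionAltHalf p.1)) 1)
      (st.1 + p.2 * max 0 ((b + 1) - max a (solutionAltHalf p.1)), st.2)).2]
  exact altStep_snd_nodup a b p.1 p.2 _ st.2 hnd

theorem LB (a b : Int) (ps : List (Int × Int)) (c0 : Int) (d0 : PySem.Dict Int Int) :
    (ps.foldl (solutionAltStep a b) (c0, d0)).1
        = c0 + (ps.map (fun p => p.2 * perB a b p.1)).sum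
    ∧ (∀ v, ((ps.foldl (solutionAltStep a b) (c0, d0)).2.getD v 0)
        = d0.getD v 0 + (ps.map (fun p => p.2 * (((spawnB a b p.1).count v : Int)))).sum)
    ∧ (d0.keys.Nodup → (ps.foldl (solutionAltStep a b) (c0, d0)).2.keys.Nodup) := by
  induction ps generalizing c0 d0 with
  | nil => simp
  | cons p t ih =>
    simp only [List.foldl_cons, List.map_cons, List.sum_cons]
    have hstep : solutionAltStep a b (c0, d0) p
        = ((solutionAltStep a b (c0, d0) p).1, (solutionAltStep a b (c0, d0) p).2) := rfl
    rw [hstep]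
    obtain ⟨h1, h2, h3⟩ := ih (solutionAltStep a b (c0, d0) p).1 (solutionAltStep a b (c0, d0) p).2
    refine ⟨?_, ?_, ?_⟩
    · rw [h1, K2a] ; ring
    · intro v; rw [h2 v, K2b]; ring
    · intro hnd; exact h3 (K2c a b (c0, d0) p hnd)

theorem sum_over_keys (S : List Int) (L : List Int) (g : Int → Int)
    (hnd : S.Nodup) (hsub : ∀ h ∈ L, h ∈ S) :
    (S.map (fun k => (L.count k : Int) * g k)).sum = (L.map g).sum := by
  induction S generalizing L with
  | nil =>
    have : L = [] := List.eq_nil_iff_forall_not_mem.2 (fun x hx => by cases hsub x hx)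
    simp [this]
  | cons k S' ih =>
    have hk : k ∉ S' := (List.nodup_cons.1 hnd).1
    have hnd' : S'.Nodup := (List.nodup_cons.1 hnd).2
    have hperm : List.Perm (L.filter (· == k) ++ L.filter (fun x => !(x == k))) L :=
      List.filter_append_perm _ L
    have hsum : (L.map g).sum = ((L.filter (· == k)).map g).sum
        + ((L.filter (fun x => !(x == k))).map g).sum := by
      rw [← List.sum_append, ← List.map_append]
      exact (List.Perm.sum_eq (List.Perm.map g hperm)).symm
    have hsub' : ∀ h ∈ L.filter (fun x => !(x == k)), h ∈ S' := by
      intro y hy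
      have := List.mem_filter.1 hy
      have hyk : y ≠ k := by simpa using this.2
      rcases List.mem_cons.1 (hsub y this.1) with h1 | h2
      · exact absurd h1 hyk
      · exact h2
    have hcnt : ∀ k' ∈ S', ((L.count k' : Int) * g k')
        = (((L.filter (fun x => !(x == k))).count k' : Int) * g k') := by
      intro k' hk'
      have hkk : k' ≠ k := fun e => hk (e ▸ hk')
      rw [List.count_filter (by simpa using hkk)]
    have hfirst : ((L.filter (· == k)).map g).sum = (L.count k : Int) * g k := by
      rw [List.filter_beq, List.map_replicate, List.sum_replicate]
      simp
    rw [List.map_cons, List.sum_cons, hsum, hfirst,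
      List.map_congr_left hcnt, ih _ hnd' hsub']

-- the level invariant: the dictionary represents the multiset of the queue
def LevelInv (L : List Int) (d : PySem.Dict Int Int) : Prop :=
  d.keys.Nodup ∧ ∀ v, d.getD v 0 = (L.count v : Int)

theorem level_corr (a b : Int) (L : List Int) (d : PySem.Dict Int Int) (hI : LevelInv L d) :
    (solutionAltLevel a b d).1 = (solutionLevel a b L).1
    ∧ LevelInv (solutionLevel a b L).2 (solutionAltLevel a b d).2 := by
  obtain ⟨hnd, hcnt⟩ := hI
  have hsub : ∀ h ∈ L, h ∈ d.keys := by
    intro y hy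
    by_contra hmem
    have hcon : d.contains y = false := by
      by_cases hc : d.contains y = true
      · exact absurd ((PySem.Dict.contains_iff_mem_keys d y).1 hc) hmem
      · simpa using hc
    have h0 := PySem.Dict.getD_of_not_contains d (0 : Int) hcon
    have hpos : 0 < L.count y := List.count_pos_iff.2 hy
    rw [hcnt y] at h0
    omega
  have hitems : d.items = d.keys.map (fun k => (k, d.getD k 0)) :=
    PySem.Dict.items_eq_map_keys d hnd 0
  obtain ⟨hb1, hb2, hb3⟩ := LB a b d.items 0 PySem.Dict.empty
  have hA := LA a b L 0 []
  unfold solutionLevel solutionAltLevel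
  rw [hA]
  have hsum1 : (d.items.map (fun p => p.2 * perB a b p.1)).sum = (L.map (perB a b)).sum := by
    rw [hitems, List.map_map]
    have : ((fun p : Int × Int => p.2 * perB a b p.1) ∘ (fun k => (k, d.getD k 0)))
        = fun k => d.getD k 0 * perB a b k := rfl
    rw [this]
    rw [List.map_congr_left (fun k _ => by rw [hcnt k])]
    exact sum_over_keys d.keys L (perB a b) hnd hsub
  refine ⟨?_, ?_, ?_⟩
  · rw [hb1, hsum1]
  · exact hb3 PySem.Dict.nodup_keys_empty
  · intro v
    rw [hb2 v]
    have hsum2 : (d.items.map (fun p => p.2 * (((spawnB a b p.1).count v : Int)))).sum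
        = (L.map (fun h => (((spawnB a b h).count v : Int)))).sum := by
      rw [hitems, List.map_map]
      have : ((fun p : Int × Int => p.2 * (((spawnB a b p.1).count v : Int)))
          ∘ (fun k => (k, d.getD k 0)))
          = fun k => d.getD k 0 * (((spawnB a b k).count v : Int)) := rfl
      rw [this]
      rw [List.map_congr_left (fun k _ => by rw [hcnt k])]
      exact sum_over_keys d.keys L (fun h => (((spawnB a b h).count v : Int))) hnd hsub
    rw [hsum2, ← count_flatMap_int]
    simp

theorem inv_init (x : Int) : LevelInv [x] (PySem.Dict.empty.insert x 1) := by
  constructor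
  · exact PySem.Dict.nodup_keys_insert _ x 1 PySem.Dict.nodup_keys_empty
  · intro v
    rw [PySem.Dict.getD_insert]
    by_cases hv : v = x
    · simp [hv]
    · have hv' : ¬ x = v := fun e => hv e.symm
      simp [hv, hv']

-- ===== VERDICT (by name: the statement is the Claim_ definition above) =====
theorem solution_spec : Claim_equal_solution := by
  intro a b x _
  unfold Spec_solution
  have e1 : PySem.List.pyRange 1 5 1 = [1, 2, 3, 4] := by decide
  have e0 : PySem.List.pyRange 0 4 1 = [0, 1, 2, 3] := by decide
  unfold solution solution_alt
  rw [e1, e0]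
  simp only [List.foldl_cons, List.foldl_nil]
  have h1 := level_corr a b [x] _ (inv_init x)
  have h2 := level_corr a b _ _ h1.2
  have h3 := level_corr a b _ _ h2.2
  have h4 := level_corr a b _ _ h3.2
  simp [h1.1, h2.1, h3.1, h4.1]
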